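-- pv_equiv track=rewrite | github.com/tldoan/PCA-OGD | scripts/script.py | generate_command
-- ===== SOURCE A (Python) =====
-- import itertools
--
-- def generate_command(params_dict,prefix_list):
--
--     final_command=[]
--     for key,value in params_dict.items():
--         if not isinstance(value,list):
--             params_dict[key]=[value]
--
--
--     keys, values = zip(*params_dict.items())
--
--     params_combination=[(keys,v) for v in itertools.product(*values)]
--
--     for i in params_combination:
--
--         command=prefix_list[0]+" "
--         for element in range(len(i[0])):
--             command+=" --"+str(i[0][element])+" "+str(i[1][element])
--
--         final_command.append(command)
--
--     return final_command
-- ===== SOURCE B (Python) =====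
-- def generate_command(params_dict, prefix_list):
--     for key, value in params_dict.items():
--         if not isinstance(value, list):
--             params_dict[key] = [value]
--     keys, values = zip(*params_dict.items())
--     commands = [prefix_list[0] + " "]
--     for k, vals in zip(keys, values):
--         commands = [c + " --" + str(k) + " " + str(v) for c in commands for v in vals]
--     return commands
-- ===== Notes on version B (the rewrite author's own statement) =====
-- stated objective: simpler
-- what changed: B drops the explicit itertools.product materialisation and per-tuple index loop, instead folding over the parameters and extending every partial command string by each value of the current parameter.
-- outside the precondition, e.g. on generate_command({'a': []}, []): A returns [], B raises IndexError
import Mathlib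
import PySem

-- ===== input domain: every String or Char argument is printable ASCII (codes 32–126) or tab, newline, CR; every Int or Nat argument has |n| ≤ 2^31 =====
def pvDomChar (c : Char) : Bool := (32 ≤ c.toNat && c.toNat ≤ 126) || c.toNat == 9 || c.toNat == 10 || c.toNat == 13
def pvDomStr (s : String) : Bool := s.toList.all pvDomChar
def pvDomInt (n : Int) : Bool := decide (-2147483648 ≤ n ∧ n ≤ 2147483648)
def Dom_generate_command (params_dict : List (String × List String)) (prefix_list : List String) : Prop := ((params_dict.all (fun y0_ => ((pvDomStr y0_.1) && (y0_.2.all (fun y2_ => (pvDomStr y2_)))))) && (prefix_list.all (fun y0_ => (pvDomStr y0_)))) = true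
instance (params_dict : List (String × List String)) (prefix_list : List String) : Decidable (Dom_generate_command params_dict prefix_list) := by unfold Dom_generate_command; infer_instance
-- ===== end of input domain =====

-- B replaces A's 'materialise the whole itertools.product, then format each tuple by an
-- index loop' with an incremental fold that extends every partial command by each value of
-- the current parameter (objective: simpler, same asymptotic cost).

-- ===== PORT A =====
-- itertools.product(*values): rightmost factor varies fastest
def pyProductStr : List (List String) → List (List String)
  | [] => [[]]
  | vs :: rest => vs.flatMap (fun v => (pyProductStr rest).map (fun c => v :: c))

-- The 'wrap non-list values' loop of A is a no-op under the declared type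
-- dict[str, list[str]] (every value already is a list), so it is omitted.
-- prefix_list[0] raises IndexError on an empty prefix_list when the loop body runs;
-- those inputs are outside Pre_ (getD "" is never observed inside Pre_).
def generate_command (params_dict : List (String × List String)) (prefix_list : List String) : List String :=
  let keys := params_dict.map Prod.fst
  let values := params_dict.map Prod.snd
  let params_combination := (pyProductStr values).map (fun v => (keys, v))
  params_combination.foldl (fun final_command i =>
    let command := (PySem.List.pyGet? prefix_list 0).getD "" ++ " "
    let command := (PySem.List.pyRange 0 (i.1.length : Int) 1).foldl
      (fun c e => c ++ " --" ++ PySem.List.pyGetD i.1 e "" ++ " " ++ PySem.List.pyGetD i.2 e "") command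
    final_command ++ [command]) []

-- ===== PORT B =====
-- Source B: commands = [prefix_list[0] + " "]; for each (k, vals) extend every command by every value
def generate_command_alt (params_dict : List (String × List String)) (prefix_list : List String) : List String :=
  params_dict.foldl
    (fun commands kv =>
      commands.flatMap (fun c => kv.2.map (fun v => c ++ " --" ++ kv.1 ++ " " ++ v)))
    [(PySem.List.pyGet? prefix_list 0).getD "" ++ " "]

-- ===== PRECONDITION & SPEC =====
-- Pre_ excludes the empty dict, on which A raises ValueError (zip of nothing), and the
-- empty prefix_list, on which A raises IndexError except in the accidental corner where
-- some parameter has an empty value list (A then returns [] without touching prefix_list,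
-- while B, which reads prefix_list[0] up front, itself raises IndexError there).
def Pre_generate_command (params_dict : List (String × List String)) (prefix_list : List String) : Prop :=
  params_dict ≠ [] ∧ prefix_list ≠ []
instance (params_dict : List (String × List String)) (prefix_list : List String) : Decidable (Pre_generate_command params_dict prefix_list) := by unfold Pre_generate_command; infer_instance
def pvWitness_generate_command : (List (String × List String)) × List String :=
  ([("a", ["1", "2"])], ["run"])

def Spec_generate_command (params_dict : List (String × List String)) (prefix_list : List String) (out : List String) : Prop := out = generate_command_alt params_dict prefix_list
instance (params_dict : List (String × List String)) (prefix_list : List String) (out : List String) : Decidable (Spec_generate_command params_dict prefix_list out) := by unfold Spec_generate_command; infer_instance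

-- ===== CLAIM (what is proved, stated in full; the proofs are below) =====
def Claim_equal_generate_command : Prop := ∀ (params_dict : List (String × List String)) (prefix_list : List String), Dom_generate_command params_dict prefix_list → Pre_generate_command params_dict prefix_list → Spec_generate_command params_dict prefix_list (generate_command params_dict prefix_list)

-- ===== LEMMAS AND PROOFS =====

-- every tuple produced by the cartesian product has one entry per factor
lemma length_mem_pyProductStr : ∀ (vss : List (List String)) (c : List String),
    c ∈ pyProductStr vss → c.length = vss.length := by
  intro vss
  induction vss with
  | nil => intro c hc; simp [pyProductStr] at hc; simp [hc]
  | cons vs rest ih =>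
    intro c hc
    simp only [pyProductStr, List.mem_flatMap, List.mem_map] at hc
    obtain ⟨v, _, c', hc', rfl⟩ := hc
    simp [ih c' hc']

-- A's index loop over a combo equals the fold over the zip of keys and the combo
lemma innerA (ks vs : List String) (init : String) (h : vs.length = ks.length) :
    (PySem.List.pyRange 0 (ks.length : Int) 1).foldl
      (fun c e => c ++ " --" ++ PySem.List.pyGetD ks e "" ++ " " ++ PySem.List.pyGetD vs e "") init
    = (ks.zip vs).foldl (fun c p => c ++ " --" ++ p.1 ++ " " ++ p.2) init := by
  have hk : (ks.zip vs).map Prod.fst = ks := List.map_fst_zip (by omega)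
  have hv : (ks.zip vs).map Prod.snd = vs := List.map_snd_zip (by omega)
  have hlen : (ks.zip vs).length = ks.length := by simp [List.length_zip]; omega
  calc (PySem.List.pyRange 0 (ks.length : Int) 1).foldl
        (fun c e => c ++ " --" ++ PySem.List.pyGetD ks e "" ++ " " ++ PySem.List.pyGetD vs e "") init
      = (PySem.List.pyRange 0 ((ks.zip vs).length : Int) 1).foldl
        (fun c e => c ++ " --" ++ (PySem.List.pyGetD (ks.zip vs) e ("", "")).1
            ++ " " ++ (PySem.List.pyGetD (ks.zip vs) e ("", "")).2) init := by
        rw [hlen]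
        apply PySem.List.foldl_congr_mem
        intro c e _
        have h1 := PySem.List.pyGetD_map Prod.fst (ks.zip vs) e ("", "")
        have h2 := PySem.List.pyGetD_map Prod.snd (ks.zip vs) e ("", "")
        simp only [hk] at h1; simp only [hv] at h2
        rw [← h1, ← h2]
    _ = (ks.zip vs).foldl (fun c p => c ++ " --" ++ p.1 ++ " " ++ p.2) init :=
        PySem.List.foldl_pyRange_zero_pyGetD' (ks.zip vs) ("", "")
          (fun c p => c ++ " --" ++ p.1 ++ " " ++ p.2) init

-- B's fold characterised: it distributes the cartesian product over the command list
lemma altFold : ∀ (pairs : List (String × List String)) (commands : List String),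
    pairs.foldl
      (fun commands kv =>
        commands.flatMap (fun c => kv.2.map (fun v => c ++ " --" ++ kv.1 ++ " " ++ v)))
      commands
    = commands.flatMap (fun c => (pyProductStr (pairs.map Prod.snd)).map
        (fun combo => ((pairs.map Prod.fst).zip combo).foldl
          (fun c p => c ++ " --" ++ p.1 ++ " " ++ p.2) c)) := by
  intro pairs
  induction pairs with
  | nil => intro commands; simp [pyProductStr]
  | cons kv rest ih =>
    intro commands
    simp only [List.foldl_cons, ih, List.flatMap_assoc, List.flatMap_map, List.map_map,
      List.map_flatMap, pyProductStr, List.map_cons]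
    rfl

-- ===== VERDICT (by name: the statement is the Claim_ definition above) =====

theorem generate_command_spec : Claim_equal_generate_command := by
  intro params_dict prefix_list _ _
  unfold Spec_generate_command generate_command generate_command_alt
  rw [altFold]
  simp only [List.flatMap_cons, List.flatMap_nil, List.append_nil]
  rw [PySem.List.foldl_append_singleton_eq_map, List.nil_append, List.map_map]
  apply List.map_congr_left
  intro combo hc
  have hlen : combo.length = (params_dict.map Prod.fst).length := by
    have := length_mem_pyProductStr _ _ hc
    simpa using this
  exact innerA (params_dict.map Prod.fst) combo _ hlen
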